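-- pv_equiv track=rewrite | github.com/MisileLab/lor | prescripts/4/library.py | all_light
-- ===== SOURCE A (Python) =====
-- def all_light(level: int=0):
--     a = ""
--     b = 0
--     c = 1
--     for _ in range(29):
--         if c % 5 == 0 and b != 4:
--             a = a + str(level) + ":"
--             c = 0
--             b += 1
--         else:
--             a = a + str(level)
--         c += 1
--     return a
-- ===== SOURCE B (Python) =====
-- def all_light(level: int=0):
--     d = str(level)
--     return ":".join([d * 5] * 4 + [d * 9])
-- ===== Notes on version B (the rewrite author's own statement) =====
-- stated objective: simpler
-- what changed: Replaces the counter-driven loop (which inserts a colon after every fifth digit until four colons are placed) by a closed-form join of five fixed-size blocks: four blocks of five copies of str(level) and one of nine.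
import Mathlib
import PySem

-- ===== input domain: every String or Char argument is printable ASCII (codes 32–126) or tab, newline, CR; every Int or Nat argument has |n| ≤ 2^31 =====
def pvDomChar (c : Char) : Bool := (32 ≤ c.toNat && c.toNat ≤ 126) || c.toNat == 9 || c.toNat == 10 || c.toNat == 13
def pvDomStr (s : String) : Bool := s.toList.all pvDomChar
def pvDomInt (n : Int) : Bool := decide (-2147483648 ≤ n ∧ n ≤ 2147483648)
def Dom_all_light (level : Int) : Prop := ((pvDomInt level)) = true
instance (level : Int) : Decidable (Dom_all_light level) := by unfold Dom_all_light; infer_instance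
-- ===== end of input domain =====

-- B replaces A's counter-driven loop by a closed-form join of five fixed digit blocks (simpler).

-- ===== PORT A =====
def all_light (level : Int) : String :=
  ((PySem.List.pyRange 0 29 1).foldl
    (fun (s : String × Int × Int) _ =>
      if PySem.Int.mod s.2.2 5 == 0 && s.2.1 != 4 then
        (s.1 ++ PySem.Int.toStr level ++ ":", s.2.1 + 1, 0 + 1)
      else
        (s.1 ++ PySem.Int.toStr level, s.2.1, s.2.2 + 1))
    ("", 0, 1)).1

-- ===== PORT B =====
-- Python's s * n (string repetition, n ≥ 0) ported step for step as n concatenated copies.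
def pyStrMul (s : String) (n : Nat) : String := String.join (List.replicate n s)

def all_light_alt (level : Int) : String :=
  let d := PySem.Int.toStr level
  PySem.Str.join ":" (List.replicate 4 (pyStrMul d 5) ++ [pyStrMul d 9])

-- ===== PRECONDITION & SPEC =====
def Spec_all_light (level : Int) (out : String) : Prop := out = all_light_alt level
instance (level : Int) (out : String) : Decidable (Spec_all_light level out) := by unfold Spec_all_light; infer_instance

-- ===== CLAIM (what is proved, stated in full; the proofs are below) =====
def Claim_equal_all_light : Prop := ∀ (level : Int), Dom_all_light level → Spec_all_light level (all_light level)

-- ===== LEMMAS AND PROOFS =====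

-- ===== VERDICT (by name: the statement is the Claim_ definition above) =====
theorem all_light_spec : Claim_equal_all_light := by
  intro level _
  unfold Spec_all_light all_light all_light_alt pyStrMul
  rw [← String.toList_inj]
  simp [PySem.List.pyRange, PySem.Int.mod, List.range_succ, String.join,
        List.replicate, PySem.Str.toList_join, PySem.Int.toList_toStr,
        PySem.Chars.join, String.toList_append, List.intercalate, List.intersperse]
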